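-- pv_equiv track=rewrite | github.com/pmg5408/chat-context | src/topic_extractor/openrouter_extractor.py | _convert_mapping
-- ===== SOURCE A (Python) =====
-- from typing import List, Dict
--
-- def _convert_mapping(topic_to_messages: Dict[str, List[int]], message_indices: List[int]) -> Dict[int, List[str]]:
--     """Convert topic->messages mapping to message->topics mapping."""
--     result = {idx: [] for idx in message_indices}
--
--     for topic, msg_indices in topic_to_messages.items():
--         normalized_topic = topic.lower().strip().replace(' ', '_')
--         for msg_idx in msg_indices:
--             if msg_idx in result:
--                 if normalized_topic not in result[msg_idx]:
--                     result[msg_idx].append(normalized_topic)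
--
--     return result
-- ===== SOURCE B (Python) =====
-- def _convert_mapping(topic_to_messages, message_indices):
--     """Gather, for each unique message index, the normalized topics whose
--     message list contains it (scanning topics per message, with a seen-set)."""
--     norm_items = [(topic.lower().strip().replace(' ', '_'), msgs)
--                   for topic, msgs in topic_to_messages.items()]
--     result = {}
--     for idx in message_indices:
--         if idx in result:
--             continue
--         topics = []
--         seen = set()
--         for nt, msgs in norm_items:
--             if idx in msgs and nt not in seen:
--                 seen.add(nt)
--                 topics.append(nt)
--         result[idx] = topics
--     return result
-- ===== Notes on version B (the rewrite author's own statement) =====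
-- stated objective: alternative
-- what changed: B inverts the loop nesting: instead of distributing each topic into per-message buckets pre-seeded from message_indices, it normalizes the topics once, then iterates over the unique message indices and for each scans the topic list with membership tests and a per-message seen-set for dedup.
import Mathlib
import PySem

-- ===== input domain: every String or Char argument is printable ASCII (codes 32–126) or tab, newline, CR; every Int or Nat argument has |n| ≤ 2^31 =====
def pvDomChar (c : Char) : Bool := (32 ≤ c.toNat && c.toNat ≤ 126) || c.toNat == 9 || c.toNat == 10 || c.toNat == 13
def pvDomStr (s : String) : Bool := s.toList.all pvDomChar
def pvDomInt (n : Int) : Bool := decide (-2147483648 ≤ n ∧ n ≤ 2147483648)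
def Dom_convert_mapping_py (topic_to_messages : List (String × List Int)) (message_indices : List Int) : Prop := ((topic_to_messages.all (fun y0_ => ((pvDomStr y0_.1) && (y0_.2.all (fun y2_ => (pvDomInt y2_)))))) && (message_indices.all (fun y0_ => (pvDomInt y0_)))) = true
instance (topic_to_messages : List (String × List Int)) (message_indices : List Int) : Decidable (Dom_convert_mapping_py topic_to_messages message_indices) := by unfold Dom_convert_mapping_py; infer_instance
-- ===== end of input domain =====

-- B inverts the loop nesting (gather topics per unique message index) instead of
-- distributing messages per topic; objective: alternative decomposition, same outputs.

-- ===== PORT A =====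
def convert_mapping_py (topic_to_messages : List (String × List Int)) (message_indices : List Int) : List (Int × List String) :=
  -- result = {idx: [] for idx in message_indices}
  let result : PySem.Dict Int (List String) :=
    message_indices.foldl (fun d idx => d.insert idx []) PySem.Dict.empty
  -- for topic, msg_indices in topic_to_messages.items(): …
  let result :=
    topic_to_messages.foldl (fun d p =>
      let normalized_topic := PySem.Str.replace (PySem.Str.strip (PySem.Str.lower p.1)) " " "_"
      p.2.foldl (fun d msg_idx =>
        if d.contains msg_idx then
          if (d.getD msg_idx []).contains normalized_topic then d
          else d.insert msg_idx ((d.getD msg_idx []) ++ [normalized_topic])  -- result[msg_idx].append(…)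
        else d) d) result
  result.items

-- ===== PORT B =====
def convert_mapping_py_alt (topic_to_messages : List (String × List Int)) (message_indices : List Int) : List (Int × List String) :=
  let norm_items := topic_to_messages.map (fun p =>
    (PySem.Str.replace (PySem.Str.strip (PySem.Str.lower p.1)) " " "_", p.2))
  let result : PySem.Dict Int (List String) :=
    message_indices.foldl (fun d idx =>
      if d.contains idx then d
      else
        let ts := norm_items.foldl (fun (acc : List String × PySem.Set String) q =>
          if q.2.contains idx && !(PySem.Set.contains acc.2 q.1) then
            (acc.1 ++ [q.1], PySem.Set.add acc.2 q.1)
          else acc) ([], PySem.Set.empty)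
        d.insert idx ts.1) PySem.Dict.empty
  result.items

-- ===== PRECONDITION & SPEC =====
def Spec_convert_mapping_py (topic_to_messages : List (String × List Int)) (message_indices : List Int) (out : List (Int × List String)) : Prop := out = convert_mapping_py_alt topic_to_messages message_indices
instance (topic_to_messages : List (String × List Int)) (message_indices : List Int) (out : List (Int × List String)) : Decidable (Spec_convert_mapping_py topic_to_messages message_indices out) := by unfold Spec_convert_mapping_py; infer_instance

-- ===== CLAIM (what is proved, stated in full; the proofs are below) =====
def Claim_equal_convert_mapping_py : Prop := ∀ (topic_to_messages : List (String × List Int)) (message_indices : List Int), Dom_convert_mapping_py topic_to_messages message_indices → Spec_convert_mapping_py topic_to_messages message_indices (convert_mapping_py topic_to_messages message_indices)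

-- ===== LEMMAS AND PROOFS =====

-- Common spec: each message k gathers the normalized topics in topic order, deduped.
def pvGather (ttm : List (String × List Int)) (k : Int) (v : List String) : List String :=
  ttm.foldl (fun acc p =>
    let nt := PySem.Str.replace (PySem.Str.strip (PySem.Str.lower p.1)) " " "_"
    if p.2.contains k && !(acc.contains nt) then acc ++ [nt] else acc) v

-- A's inner loop over one topic's message list, per-item effect on the items list.
theorem pv_innerA (ms : List Int) (nt : String) :
    ∀ (d : PySem.Dict Int (List String)), d.keys.Nodup →
    (ms.foldl (fun d msg_idx =>
        if d.contains msg_idx then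
          if (d.getD msg_idx []).contains nt then d
          else d.insert msg_idx ((d.getD msg_idx []) ++ [nt])
        else d) d).items
    = d.items.map (fun kv => (kv.1, if ms.contains kv.1 && !(kv.2.contains nt) then kv.2 ++ [nt] else kv.2)) := by
  induction ms with
  | nil =>
    intro d _
    simp
  | cons m rest ih =>
    intro d hnd
    simp only [List.foldl_cons]
    by_cases hc : d.contains m
    · by_cases hmem : (d.getD m []).contains nt
      · -- no change at m
        rw [if_pos hc, if_pos hmem, ih d hnd]
        apply List.map_congr_left
        intro kv hkv
        by_cases hk : kv.1 = m
        · have hv : kv.2 = d.getD m [] := by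
            subst hk
            exact (PySem.Dict.getD_of_mem_items d hkv hnd []).symm
          have hmem' : nt ∈ d.getD m [] := by simpa using hmem
          simp [hk, hv, hmem']
        · simp [hk]
      · -- append nt at m
        rw [if_pos hc, if_neg hmem]
        set d' := d.insert m ((d.getD m []) ++ [nt]) with hd'
        have hkeys : d'.keys = d.keys := PySem.Dict.keys_insert_of_contains _ _ hc
        have hnd' : d'.keys.Nodup := by rw [hkeys]; exact hnd
        rw [ih d' hnd']
        rw [hd', PySem.Dict.items_insert_of_contains _ _ hc, List.map_map]
        apply List.map_congr_left
        intro kv hkv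
        by_cases hk : kv.1 = m
        · have hv : kv.2 = d.getD m [] := by
            subst hk
            exact (PySem.Dict.getD_of_mem_items d hkv hnd []).symm
          simp only [Function.comp_apply, hk, beq_self_eq_true, if_true]
          have hmem' : nt ∉ d.getD m [] := by simpa using hmem
          simp [hv, hmem']
        · have : (kv.1 == m) = false := by simp [hk]
          simp only [Function.comp_apply, this]
          simp [hk]
    · -- key absent: nothing changes, and no kv has kv.1 = m
      rw [if_neg hc, ih d hnd]
      apply List.map_congr_left
      intro kv hkv
      have hk : kv.1 ≠ m := by
        intro h
        have : kv.1 ∈ d.keys := PySem.Dict.mem_keys_of_mem_items d hkv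
        rw [PySem.Dict.contains_eq_decide_mem_keys] at hc
        simp [h] at this
        exact (by simp [this] at hc)
      simp [hk]

-- A's outer loop over topics, acting pointwise on the items list.
theorem pv_outerA (ttm : List (String × List Int)) :
    ∀ (d : PySem.Dict Int (List String)), d.keys.Nodup →
    (ttm.foldl (fun d p =>
        let nt := PySem.Str.replace (PySem.Str.strip (PySem.Str.lower p.1)) " " "_"
        p.2.foldl (fun d msg_idx =>
          if d.contains msg_idx then
            if (d.getD msg_idx []).contains nt then d
            else d.insert msg_idx ((d.getD msg_idx []) ++ [nt])
          else d) d) d).items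
    = d.items.map (fun kv => (kv.1, pvGather ttm kv.1 kv.2)) := by
  induction ttm with
  | nil =>
    intro d _
    simp [pvGather]
  | cons p rest ih =>
    intro d hnd
    simp only [List.foldl_cons]
    set nt := PySem.Str.replace (PySem.Str.strip (PySem.Str.lower p.1)) " " "_" with hnt
    set d' := p.2.foldl (fun d msg_idx =>
          if d.contains msg_idx then
            if (d.getD msg_idx []).contains nt then d
            else d.insert msg_idx ((d.getD msg_idx []) ++ [nt])
          else d) d with hd'
    have hitems : d'.items = d.items.map (fun kv => (kv.1, if p.2.contains kv.1 && !(kv.2.contains nt) then kv.2 ++ [nt] else kv.2)) :=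
      pv_innerA p.2 nt d hnd
    have hkeys : d'.keys = d.keys := by
      unfold PySem.Dict.keys
      rw [hitems, List.map_map]
      rfl
    have hnd' : d'.keys.Nodup := by rw [hkeys]; exact hnd
    rw [ih d' hnd', hitems, List.map_map]
    apply List.map_congr_left
    intro kv _
    simp only [Function.comp_apply, hnt, pvGather, List.foldl_cons]

-- Values of A's seed dict are all [].
theorem pv_initA_getD (mi : List Int) :
    ∀ (d : PySem.Dict Int (List String)), (∀ j, d.getD j [] = []) →
    ∀ j, (mi.foldl (fun d idx => d.insert idx []) d).getD j [] = [] := by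
  induction mi with
  | nil => intro d h j; simpa using h j
  | cons m rest ih =>
    intro d h j
    simp only [List.foldl_cons]
    apply ih
    intro j'
    by_cases hj : j' = m
    · simp [hj, PySem.Dict.getD_insert_self]
    · rw [PySem.Dict.getD_insert_of_ne _ _ _ hj]; exact h j'

-- B's outer loop: items = one entry per unique index, in first-occurrence order.
theorem pv_outerB (ttm : List (String × List Int)) (mi : List Int) :
    ∀ (L : List Int) (d : PySem.Dict Int (List String)),
    d.keys = L →
    d.items = L.map (fun k => (k,
      ((ttm.map (fun p => (PySem.Str.replace (PySem.Str.strip (PySem.Str.lower p.1)) " " "_", p.2))).foldl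
        (fun (acc : List String × PySem.Set String) q =>
          if q.2.contains k && !(PySem.Set.contains acc.2 q.1) then
            (acc.1 ++ [q.1], PySem.Set.add acc.2 q.1)
          else acc) ([], PySem.Set.empty)).1)) →
    (mi.foldl (fun d idx =>
      if d.contains idx then d
      else
        let ts := (ttm.map (fun p => (PySem.Str.replace (PySem.Str.strip (PySem.Str.lower p.1)) " " "_", p.2))).foldl
          (fun (acc : List String × PySem.Set String) q =>
            if q.2.contains idx && !(PySem.Set.contains acc.2 q.1) then
              (acc.1 ++ [q.1], PySem.Set.add acc.2 q.1)
            else acc) ([], PySem.Set.empty)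
        d.insert idx ts.1) d).items
    = (PySem.Set.update L mi).map (fun k => (k,
      ((ttm.map (fun p => (PySem.Str.replace (PySem.Str.strip (PySem.Str.lower p.1)) " " "_", p.2))).foldl
        (fun (acc : List String × PySem.Set String) q =>
          if q.2.contains k && !(PySem.Set.contains acc.2 q.1) then
            (acc.1 ++ [q.1], PySem.Set.add acc.2 q.1)
          else acc) ([], PySem.Set.empty)).1)) := by
  induction mi with
  | nil =>
    intro L d hk hi
    simpa [PySem.Set.update] using hi
  | cons idx rest ih =>
    intro L d hk hi
    simp only [List.foldl_cons]
    by_cases hc : d.contains idx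
    · rw [if_pos hc]
      have hadd : PySem.Set.add L idx = L := by
        rw [PySem.Dict.contains_eq_decide_mem_keys, hk] at hc
        have : idx ∈ L := by simpa using hc
        simp [PySem.Set.add, PySem.Set.contains, this]
      have : PySem.Set.update L (idx :: rest) = PySem.Set.update L rest := by
        simp [PySem.Set.update, hadd]
      rw [this]
      exact ih L d hk hi
    · rw [if_neg hc]
      have hadd : PySem.Set.add L idx = L ++ [idx] := by
        rw [PySem.Dict.contains_eq_decide_mem_keys, hk] at hc
        have : idx ∉ L := by simpa using hc
        simp [PySem.Set.add, PySem.Set.contains, this]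
      have hupd : PySem.Set.update L (idx :: rest) = PySem.Set.update (L ++ [idx]) rest := by
        simp [PySem.Set.update, hadd]
      rw [hupd]
      apply ih (L ++ [idx])
      · have hc' : d.contains idx = false := by simpa using hc
        rw [PySem.Dict.keys_insert_of_not_contains _ _ hc', hk]
      · have hc' : d.contains idx = false := by simpa using hc
        rw [PySem.Dict.items_insert_of_not_contains _ _ hc', hi, List.map_append]
        simp

-- B's per-message scan with a seen-set equals the plain deduped gather.
theorem pv_gatherB (ttm : List (String × List Int)) (k : Int) :
    ∀ (ts : List String) (sn : PySem.Set String),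
    (∀ x, PySem.Set.contains sn x = ts.contains x) →
    ((ttm.map (fun p => (PySem.Str.replace (PySem.Str.strip (PySem.Str.lower p.1)) " " "_", p.2))).foldl
      (fun (acc : List String × PySem.Set String) q =>
        if q.2.contains k && !(PySem.Set.contains acc.2 q.1) then
          (acc.1 ++ [q.1], PySem.Set.add acc.2 q.1)
        else acc) (ts, sn)).1
    = pvGather ttm k ts := by
  induction ttm with
  | nil => intro ts sn _; simp [pvGather]
  | cons p rest ih =>
    intro ts sn hinv
    simp only [List.map_cons, List.foldl_cons, pvGather] at *
    set nt := PySem.Str.replace (PySem.Str.strip (PySem.Str.lower p.1)) " " "_" with hnt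
    rw [hinv nt]
    by_cases hcond : (p.2.contains k && !(ts.contains nt)) = true
    · rw [if_pos hcond, if_pos hcond]
      apply ih
      have hts : ts.contains nt = false := by
        rcases Bool.and_eq_true_iff.mp hcond with ⟨_, h2⟩
        simpa using h2
      have hsn : PySem.Set.contains sn nt = false := by rw [hinv nt]; exact hts
      intro x
      show PySem.Set.contains (PySem.Set.add sn nt) x = (ts ++ [nt]).contains x
      simp only [PySem.Set.add, hsn, Bool.false_eq_true, if_false]
      show List.contains (sn ++ [nt]) x = (ts ++ [nt]).contains x
      rw [List.contains_append, List.contains_append]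
      have : List.contains sn x = ts.contains x := hinv x
      rw [this]
    · rw [if_neg hcond, if_neg hcond]
      exact ih ts sn hinv

-- ===== VERDICT (by name: the statement is the Claim_ definition above) =====
theorem convert_mapping_py_spec : Claim_equal_convert_mapping_py := by
  intro ttm mi _
  unfold Spec_convert_mapping_py convert_mapping_py convert_mapping_py_alt
  -- A's seed dict
  set d0 : PySem.Dict Int (List String) := mi.foldl (fun d idx => d.insert idx []) PySem.Dict.empty with hd0
  have hkeys0 : d0.keys = PySem.Set.update PySem.Dict.empty.keys mi :=
    PySem.Dict.keys_foldl_insert mi (fun _ _ => ([] : List String)) PySem.Dict.empty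
  have hkeys0' : d0.keys = PySem.Set.update ([] : List Int) mi := by
    simpa using hkeys0
  have hnd0 : d0.keys.Nodup :=
    PySem.Dict.nodup_keys_foldl_insert mi (fun _ _ => ([] : List String)) PySem.Dict.empty (by simp)
  have hget0 : ∀ j, d0.getD j [] = [] :=
    pv_initA_getD mi PySem.Dict.empty (by simp) 
  have hitems0 : d0.items = d0.keys.map (fun k => (k, ([] : List String))) := by
    rw [PySem.Dict.items_eq_map_keys d0 hnd0 []]
    apply List.map_congr_left
    intro k _
    rw [hget0 k]
  -- A's items
  rw [pv_outerA ttm d0 hnd0, hitems0, List.map_map]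
  -- B's items
  rw [pv_outerB ttm mi ([] : List Int) PySem.Dict.empty (by simp) (by rfl)]
  rw [← hkeys0']
  apply List.map_congr_left
  intro k _
  simp only [Function.comp_apply]
  rw [pv_gatherB ttm k [] PySem.Set.empty (by intro x; simp [PySem.Set.empty, PySem.Set.contains])]
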